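-- pv_equiv track=rewrite | github.com/gedwards09/Wordle | WordleFunctions.py | hardModeFilter
-- ===== SOURCE A (Python) =====
-- def hardModeFilter(word,guess,sig):
--     dic={}
--     if word==guess:
--         return False
--     for i in range(5):
--         # keep count of the "Y" chars that must appear in
--         # each possible guess
--         if sig[i]=="Y":
--             if guess[i] not in dic:
--                 dic[guess[i]]=1
--             else:
--                 dic[guess[i]]+=1
--     for i in range(5):
--         if sig[i]=="G" and word[i]!=guess[i]:
--             return False
--         elif word[i] in dic:
--             if dic[word[i]]>0:
--                 dic[word[i]]-=1
--     for key in dic: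
--         if dic[key]>0:
--             return False
--     return True
-- ===== SOURCE B (Python) =====
-- def _contained(need, have):
--     # both lists sorted ascending: ordered merge checking need is a sub-multiset of have
--     if not need:
--         return True
--     if not have:
--         return False
--     if have[0] < need[0]:
--         return _contained(need, have[1:])
--     if have[0] == need[0]:
--         return _contained(need[1:], have[1:])
--     return False
--
-- def hardModeFilter(word, guess, sig):
--     if word == guess:
--         return False
--     for i in range(5):
--         if sig[i] == "G" and word[i] != guess[i]:
--             return False
--     need = sorted(guess[i] for i in range(5) if sig[i] == "Y")
--     have = sorted(word[i] for i in range(5))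
--     return _contained(need, have)
-- ===== Notes on version B (the rewrite author's own statement) =====
-- stated objective: alternative
-- what changed: Replaces A's stateful decrement-until-zero dictionary with a sort-then-merge algorithm: sort the yellow-required letters and the word's letters, then a recursive two-pointer ordered scan checks sub-multiset containment; no counter is ever built.
-- outside the precondition, e.g. on hardModeFilter('a', 'bbbbb', 'GXXXX'): A returns False, B returns False
import Mathlib
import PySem

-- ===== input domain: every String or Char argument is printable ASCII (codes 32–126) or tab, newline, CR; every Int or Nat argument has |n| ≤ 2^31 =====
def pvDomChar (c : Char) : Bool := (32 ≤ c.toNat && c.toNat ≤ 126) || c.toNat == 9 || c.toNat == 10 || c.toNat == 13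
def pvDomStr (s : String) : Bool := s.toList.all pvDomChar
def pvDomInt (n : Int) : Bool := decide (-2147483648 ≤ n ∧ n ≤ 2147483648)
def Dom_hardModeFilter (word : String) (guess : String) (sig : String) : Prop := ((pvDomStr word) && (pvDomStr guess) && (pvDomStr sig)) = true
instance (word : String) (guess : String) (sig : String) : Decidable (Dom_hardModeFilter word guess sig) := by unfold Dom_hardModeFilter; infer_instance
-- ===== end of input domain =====

-- B replaces A's decrement-until-zero dictionary with sort-then-merge: sort the
-- yellow-required letters and the word's letters, then a recursive two-pointer
-- ordered scan decides sub-multiset containment; objective: alternative algorithm.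


-- ===== PORT A =====
-- s[i] for 0 ≤ i < 5; inside Pre_ (length ≥ 5) the default is never used (Python raises outside Pre_)
def pvChr (s : String) (i : Nat) : Char := (PySem.Str.pyGet? s (i : Int)).getD ' '

def hardModeFilter (word : String) (guess : String) (sig : String) : Bool :=
  if word == guess then false
  else
    -- first loop: count the "Y" chars that must appear
    let dic : PySem.Dict Char Int :=
      (List.range 5).foldl (fun d i =>
        if pvChr sig i == 'Y' then
          match d.get? (pvChr guess i) with
          | none => d.insert (pvChr guess i) 1
          | some v => d.insert (pvChr guess i) (v + 1)
        else d) PySem.Dict.empty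
    -- second loop: early return on green mismatch (flag), else greedy decrements
    let st : Bool × PySem.Dict Char Int :=
      (List.range 5).foldl (fun st i =>
        if st.1 then st
        else if pvChr sig i == 'G' && pvChr word i != pvChr guess i then (true, st.2)
        else match st.2.get? (pvChr word i) with
          | some v => if v > 0 then (false, st.2.insert (pvChr word i) (v - 1)) else st
          | none => st) (false, dic)
    if st.1 then false
    else !st.2.items.any (fun kv => decide (kv.2 > 0))

-- ===== PORT B =====
-- recursive two-pointer merge over two ascending lists: is `need` a sub-multiset of `have_`?
def pvContained : List Char → List Char → Bool
  | [], _ => true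
  | _ :: _, [] => false
  | n :: ns, h :: hs =>
      if h < n then pvContained (n :: ns) hs
      else if h == n then pvContained ns hs
      else false
termination_by ns hs => ns.length + hs.length
decreasing_by all_goals (simp [List.length_cons]; try omega)

def hardModeFilter_alt (word : String) (guess : String) (sig : String) : Bool :=
  if word == guess then false
  else if (List.range 5).any (fun i => pvChr sig i == 'G' && pvChr word i != pvChr guess i) then false
  else
    let need := PySem.List.sorted (((List.range 5).filter (fun i => pvChr sig i == 'Y')).map (pvChr guess)) (fun c => c) false
    let haveL := PySem.List.sorted ((List.range 5).map (pvChr word)) (fun c => c) false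
    pvContained need haveL

-- ===== PRECONDITION & SPEC =====
-- Pre_ excludes strings shorter than 5 characters (unless word == guess, where A returns at once):
-- Python A indexes positions 0..4 and raises IndexError on most such inputs; on the few where an
-- early green mismatch returns False before the out-of-range index is reached, B returns False too.
def Pre_hardModeFilter (word : String) (guess : String) (sig : String) : Prop :=
  word = guess ∨ (5 ≤ word.toList.length ∧ 5 ≤ guess.toList.length ∧ 5 ≤ sig.toList.length)
instance (word : String) (guess : String) (sig : String) : Decidable (Pre_hardModeFilter word guess sig) := by
  unfold Pre_hardModeFilter; infer_instance

def pvWitness_hardModeFilter : String × String × String := ("crane", "trace", "GYXYY")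

def Spec_hardModeFilter (word : String) (guess : String) (sig : String) (out : Bool) : Prop := out = hardModeFilter_alt word guess sig
instance (word : String) (guess : String) (sig : String) (out : Bool) : Decidable (Spec_hardModeFilter word guess sig out) := by unfold Spec_hardModeFilter; infer_instance

-- ===== CLAIM (what is proved, stated in full; the proofs are below) =====
def Claim_equal_hardModeFilter : Prop := ∀ (word : String) (guess : String) (sig : String), Dom_hardModeFilter word guess sig → Pre_hardModeFilter word guess sig → Spec_hardModeFilter word guess sig (hardModeFilter word guess sig)

-- ===== LEMMAS AND PROOFS =====

-- named forms of A's loop step functions (definitionally the port's lambdas)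
def pvGreen (word guess sig : String) (i : Nat) : Bool :=
  pvChr sig i == 'G' && pvChr word i != pvChr guess i

def pvStep2 (word guess sig : String) (st : Bool × PySem.Dict Char Int) (i : Nat) :
    Bool × PySem.Dict Char Int :=
  if st.1 then st
  else if pvChr sig i == 'G' && pvChr word i != pvChr guess i then (true, st.2)
  else match st.2.get? (pvChr word i) with
    | some v => if v > 0 then (false, st.2.insert (pvChr word i) (v - 1)) else st
    | none => st

def pvStepY (guess sig : String) (d : PySem.Dict Char Int) (i : Nat) : PySem.Dict Char Int :=
  if pvChr sig i == 'Y' then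
    match d.get? (pvChr guess i) with
    | none => d.insert (pvChr guess i) 1
    | some v => d.insert (pvChr guess i) (v + 1)
  else d

-- the letters the 'Y' positions of l require
def pvNeedOf (guess sig : String) (l : List Nat) : List Char :=
  (l.filter (fun i => pvChr sig i == 'Y')).map (pvChr guess)

-- A's first loop is the counter of the required-letter list
theorem pvFoldY_eq (guess sig : String) (l : List Nat) (d : PySem.Dict Char Int) :
    l.foldl (pvStepY guess sig) d
      = (pvNeedOf guess sig l).foldl (fun d c => d.insert c (d.getD c 0 + 1)) d := by
  induction l generalizing d with
  | nil => rfl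
  | cons i l ih =>
      rw [List.foldl_cons]
      unfold pvNeedOf
      by_cases hy : (pvChr sig i == 'Y') = true
      · rw [List.filter_cons, if_pos hy, List.map_cons, List.foldl_cons]
        have hstep : pvStepY guess sig d i
            = d.insert (pvChr guess i) (d.getD (pvChr guess i) 0 + 1) := by
          unfold pvStepY
          rw [if_pos hy]
          cases h : d.get? (pvChr guess i) with
          | none =>
              show d.insert (pvChr guess i) 1 = _
              rw [PySem.Dict.getD_of_get?_eq_none d 0 h]; norm_num
          | some v =>
              show d.insert (pvChr guess i) (v + 1) = _
              rw [PySem.Dict.getD_of_get?_eq_some d 0 h]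
        rw [hstep, ih]
        rfl
      · rw [List.filter_cons, if_neg hy]
        have hstep : pvStepY guess sig d i = d := by unfold pvStepY; rw [if_neg hy]
        rw [hstep, ih]
        rfl

-- second loop: how each step acts
theorem pvStep2_stay (word guess sig : String) (st : Bool × PySem.Dict Char Int) (i : Nat)
    (h : st.1 = true) : pvStep2 word guess sig st i = st := by
  unfold pvStep2; rw [if_pos h]

theorem pvStep2_green (word guess sig : String) (d : PySem.Dict Char Int) (i : Nat)
    (hg : pvGreen word guess sig i = true) :
    pvStep2 word guess sig (false, d) i = (true, d) := by
  unfold pvStep2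
  rw [if_neg (by simp), if_pos (by rw [pvGreen] at hg; exact hg)]

theorem pvStep2_none (word guess sig : String) (d : PySem.Dict Char Int) (i : Nat)
    (hg : pvGreen word guess sig i = false) (h : d.get? (pvChr word i) = none) :
    pvStep2 word guess sig (false, d) i = (false, d) := by
  unfold pvStep2
  rw [if_neg (by simp), if_neg (by rw [pvGreen] at hg; simp [hg]), h]

theorem pvStep2_pos (word guess sig : String) (d : PySem.Dict Char Int) (i : Nat) (v : Int)
    (hg : pvGreen word guess sig i = false) (h : d.get? (pvChr word i) = some v) (hv : v > 0) :
    pvStep2 word guess sig (false, d) i = (false, d.insert (pvChr word i) (v - 1)) := by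
  unfold pvStep2
  rw [if_neg (by simp), if_neg (by rw [pvGreen] at hg; simp [hg]), h]
  exact if_pos hv

theorem pvStep2_zero (word guess sig : String) (d : PySem.Dict Char Int) (i : Nat) (v : Int)
    (hg : pvGreen word guess sig i = false) (h : d.get? (pvChr word i) = some v) (hv : ¬ v > 0) :
    pvStep2 word guess sig (false, d) i = (false, d) := by
  unfold pvStep2
  rw [if_neg (by simp), if_neg (by rw [pvGreen] at hg; simp [hg]), h]
  exact if_neg hv

-- once the early-return flag is set it never changes
theorem pvA2_true (word guess sig : String) (l : List Nat) (st : Bool × PySem.Dict Char Int)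
    (h : st.1 = true) : l.foldl (pvStep2 word guess sig) st = st := by
  induction l with
  | nil => rfl
  | cons i l ih => rw [List.foldl_cons, pvStep2_stay word guess sig st i h, ih]

-- the flag after the loop is exactly "some position is a green mismatch"
theorem pvA2_flag (word guess sig : String) (l : List Nat) (d : PySem.Dict Char Int) :
    (l.foldl (pvStep2 word guess sig) (false, d)).1 = l.any (pvGreen word guess sig) := by
  induction l generalizing d with
  | nil => rfl
  | cons i l ih =>
      rw [List.foldl_cons, List.any_cons]
      cases hg : pvGreen word guess sig i with
      | true => rw [pvStep2_green word guess sig d i hg, pvA2_true word guess sig l _ rfl, Bool.true_or]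
      | false =>
          rw [Bool.false_or]
          cases h : (PySem.Dict.get? d (pvChr word i)) with
          | none => rw [pvStep2_none word guess sig d i hg h]; exact ih d
          | some v =>
              by_cases hv : v > 0
              · rw [pvStep2_pos word guess sig d i v hg h hv]; exact ih _
              · rw [pvStep2_zero word guess sig d i v hg h hv]; exact ih d

-- with no green mismatch, the greedy decrements leave max 0 (required - available) at each key
theorem pvA2_getD (word guess sig : String) (l : List Nat) (d : PySem.Dict Char Int) (c : Char)
    (hng : l.any (pvGreen word guess sig) = false) (h0 : 0 ≤ d.getD c 0) :
    (l.foldl (pvStep2 word guess sig) (false, d)).2.getD c 0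
      = max 0 (d.getD c 0 - ((l.map (pvChr word)).count c : Int)) := by
  induction l generalizing d with
  | nil => simp; omega
  | cons i l ih =>
      simp only [List.any_cons, Bool.or_eq_false_iff] at hng
      obtain ⟨hg, hng⟩ := hng
      have hcnt : (((i :: l).map (pvChr word)).count c : Int)
          = ((l.map (pvChr word)).count c : Int) + (if c = pvChr word i then 1 else 0) := by
        by_cases hc : c = pvChr word i <;> simp [hc, eq_comm]
      rw [List.foldl_cons, hcnt]
      cases h : (PySem.Dict.get? d (pvChr word i)) with
      | none =>
          rw [pvStep2_none word guess sig d i hg h, ih d hng h0]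
          by_cases hc : c = pvChr word i
          · have hz : d.getD c 0 = 0 := by rw [hc]; exact PySem.Dict.getD_of_get?_eq_none d 0 h
            rw [hz, if_pos hc]; omega
          · rw [if_neg hc]; omega
      | some v =>
          by_cases hv : v > 0
          · rw [pvStep2_pos word guess sig d i v hg h hv]
            have hins : (d.insert (pvChr word i) (v - 1)).getD c 0
                = if c = pvChr word i then v - 1 else d.getD c 0 := PySem.Dict.getD_insert ..
            rw [ih _ hng (by rw [hins]; split_ifs with hc <;> [omega; exact h0]), hins]
            by_cases hc : c = pvChr word i
            · have hd : d.getD c 0 = v := by rw [hc]; exact PySem.Dict.getD_of_get?_eq_some d 0 h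
              rw [if_pos hc, if_pos hc, hd]; omega
            · rw [if_neg hc, if_neg hc]; omega
          · rw [pvStep2_zero word guess sig d i v hg h hv, ih d hng h0]
            by_cases hc : c = pvChr word i
            · have hd : d.getD c 0 = v := by rw [hc]; exact PySem.Dict.getD_of_get?_eq_some d 0 h
              rw [if_pos hc, hd]; omega
            · rw [if_neg hc]; omega

-- with no green mismatch, the key set never changes (inserts hit existing keys only)
theorem pvA2_keys (word guess sig : String) (l : List Nat) (d : PySem.Dict Char Int)
    (hng : l.any (pvGreen word guess sig) = false) :
    (l.foldl (pvStep2 word guess sig) (false, d)).2.keys = d.keys := by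
  induction l generalizing d with
  | nil => rfl
  | cons i l ih =>
      simp only [List.any_cons, Bool.or_eq_false_iff] at hng
      obtain ⟨hg, hng⟩ := hng
      rw [List.foldl_cons]
      cases h : (PySem.Dict.get? d (pvChr word i)) with
      | none => rw [pvStep2_none word guess sig d i hg h, ih d hng]
      | some v =>
          by_cases hv : v > 0
          · rw [pvStep2_pos word guess sig d i v hg h hv, ih _ hng]
            exact PySem.Dict.keys_insert_of_contains _ _
              (by rw [PySem.Dict.contains_eq_isSome_get?, h]; rfl)
          · rw [pvStep2_zero word guess sig d i v hg h hv, ih d hng]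

-- B's merge on two ascending lists decides the per-letter count inequality
theorem pvContained_iff (ns hs : List Char) (hn : ns.Pairwise (· ≤ ·)) (hh : hs.Pairwise (· ≤ ·)) :
    pvContained ns hs = true ↔ ∀ c : Char, ns.count c ≤ hs.count c := by
  induction ns, hs using pvContained.induct with
  | case1 hs =>
      simp [pvContained]
  | case2 n ns =>
      rw [show pvContained (n :: ns) [] = false by rw [pvContained]]
      simp only [Bool.false_eq_true, false_iff]
      intro hall
      have := hall n
      simp at this
  | case3 n ns h hs hlt ih =>
      rcases List.pairwise_cons.mp hh with ⟨hhle, hhtail⟩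
      rcases List.pairwise_cons.mp hn with ⟨hnle, _⟩
      have hcontained : pvContained (n :: ns) (h :: hs) = pvContained (n :: ns) hs := by
        rw [pvContained, if_pos (by exact hlt)]
      rw [hcontained, ih hn hhtail]
      constructor
      · -- counts against hs imply counts against h :: hs (monotone)
        intro hall c
        have := hall c
        have hle : hs.count c ≤ (h :: hs).count c := by
          by_cases hc : c = h <;> simp [List.count_cons, hc]
        omega
      · -- counts against h :: hs imply counts against hs: h < n ≤ all of n :: ns, so h unused
        intro hall c
        have hc1 := hall c
        by_cases hc : c = h
        · have hz : (n :: ns).count c = 0 := by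
            rw [List.count_eq_zero]
            intro hmem
            have hge : n ≤ c := by
              rcases List.mem_cons.mp hmem with rfl | hm
              · exact le_refl _
              · exact hnle c hm
            rw [hc] at hge
            exact absurd (lt_of_le_of_lt hge hlt) (lt_irrefl _)
          rw [hz]; exact Nat.zero_le _
        · have heq : (h :: hs).count c = hs.count c := by
            simp [(Ne.symm hc : h ≠ c)]
          omega
  | case4 n ns h hs hlt heq ih =>
      rcases List.pairwise_cons.mp hn with ⟨_, hntail⟩
      rcases List.pairwise_cons.mp hh with ⟨_, hhtail⟩
      have hcontained : pvContained (n :: ns) (h :: hs) = pvContained ns hs := by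
        rw [pvContained, if_neg (by exact hlt), if_pos (by exact heq)]
      have hhn : h = n := beq_iff_eq.mp heq
      subst hhn
      rw [hcontained, ih hntail hhtail]
      constructor <;>
        · intro hall c
          have := hall c
          by_cases hc : c = h <;> simp [List.count_cons, hc] at this ⊢ <;> omega
  | case5 n ns h hs hlt hne =>
      have hcontained : pvContained (n :: ns) (h :: hs) = false := by
        rw [pvContained, if_neg (by exact hlt), if_neg (by exact hne)]
      rw [hcontained]
      simp only [Bool.false_eq_true, false_iff]
      intro hall
      rcases List.pairwise_cons.mp hh with ⟨hhle, _⟩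
      have hnlt : n < h := by
        rcases lt_trichotomy h n with hlt' | heq' | hgt'
        · exact absurd hlt' hlt
        · exact absurd (beq_iff_eq.mpr heq') (by simpa using hne)
        · exact hgt'
      have hz : (h :: hs).count n = 0 := by
        rw [List.count_eq_zero]
        intro hmem
        have hge : h ≤ n := by
          rcases List.mem_cons.mp hmem with rfl | hm
          · exact le_refl _
          · exact hhle n hm
        exact absurd (lt_of_lt_of_le hnlt hge) (lt_irrefl _)
      have := hall n
      rw [hz] at this
      simp at this

-- ===== VERDICT (by name: the statement is the Claim_ definition above) =====
theorem hardModeFilter_spec : Claim_equal_hardModeFilter := by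
  intro word guess sig _ _
  unfold Spec_hardModeFilter hardModeFilter hardModeFilter_alt
  by_cases hwg : (word == guess) = true
  · rw [if_pos hwg, if_pos hwg]
  · rw [if_neg hwg, if_neg hwg]
    show (let dic := List.foldl (pvStepY guess sig) PySem.Dict.empty (List.range 5);
          let st := List.foldl (pvStep2 word guess sig) (false, dic) (List.range 5);
          if st.1 then false else !st.2.items.any (fun kv => decide (kv.2 > 0)))
        = (if (List.range 5).any (pvGreen word guess sig) then false
           else pvContained
                  (PySem.List.sorted (pvNeedOf guess sig (List.range 5)) (fun c => c) false)
                  (PySem.List.sorted ((List.range 5).map (pvChr word)) (fun c => c) false))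
    dsimp only
    rw [pvA2_flag]
    cases hG : (List.range 5).any (pvGreen word guess sig) with
    | true => rw [if_pos rfl, if_pos rfl]
    | false =>
        rw [if_neg (by simp), if_neg (by simp)]
        set needL := pvNeedOf guess sig (List.range 5) with hneedL
        set haveL := (List.range 5).map (pvChr word) with hhaveL
        -- A's first loop is Counter(needL)
        have hrq : List.foldl (pvStepY guess sig) PySem.Dict.empty (List.range 5)
            = PySem.Dict.counter needL := by
          rw [pvFoldY_eq]
          exact PySem.Dict.foldl_insert_getD_add_one_eq_counter needL
        rw [hrq]
        set fin := (List.foldl (pvStep2 word guess sig) (false, PySem.Dict.counter needL)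
            (List.range 5)).2 with hfin
        have hkeys : fin.keys = (PySem.Dict.counter needL).keys :=
          pvA2_keys word guess sig _ _ hG
        have hfnodup : fin.keys.Nodup := by
          rw [hkeys]; exact PySem.Dict.nodup_keys_counter needL
        have hfd : ∀ k : Char, fin.getD k 0
            = max 0 ((needL.count k : Int) - (haveL.count k : Int)) := by
          intro k
          rw [hfin, pvA2_getD word guess sig _ _ k hG
              (by rw [PySem.Dict.getD_counter]; positivity),
            PySem.Dict.getD_counter]
        -- A's result is the per-letter count inequality
        have hAiff : (!fin.items.any (fun kv => decide (kv.2 > 0))) = true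
            ↔ ∀ c : Char, needL.count c ≤ haveL.count c := by
          rw [Bool.not_eq_eq_eq_not, Bool.not_true, List.any_eq_false]
          constructor
          · intro hall c
            by_cases hc : c ∈ fin.keys
            · have hmem : (c, fin.getD c 0) ∈ fin.items := by
                rw [PySem.Dict.items_eq_map_keys fin hfnodup 0]
                exact List.mem_map.mpr ⟨c, hc, rfl⟩
              have := hall _ hmem
              have h2 := hfd c
              simp only [decide_eq_true_eq] at this
              omega
            · have hz : needL.count c = 0 := by
                rw [List.count_eq_zero]
                intro hm
                exact hc (by
                  rw [hkeys, PySem.Dict.keys_counter]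
                  exact (PySem.Set.mem_ofList _ _).mpr hm)
              omega
          · intro hall kv hmem
            rw [PySem.Dict.items_eq_map_keys fin hfnodup 0] at hmem
            rcases List.mem_map.mp hmem with ⟨k, _, rfl⟩
            have h2 := hfd k
            have := hall k
            simp only [decide_eq_true_eq]
            omega
        -- B's result is the same inequality (sorting permutes, merge decides)
        have hBiff : pvContained
              (PySem.List.sorted needL (fun c => c) false)
              (PySem.List.sorted haveL (fun c => c) false) = true
            ↔ ∀ c : Char, needL.count c ≤ haveL.count c := by
          rw [pvContained_iff _ _
              (PySem.List.sorted_pairwise needL (fun c => c))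
              (PySem.List.sorted_pairwise haveL (fun c => c))]
          have h1 : ∀ c : Char, (PySem.List.sorted needL (fun c => c) false).count c = needL.count c :=
            fun c => (PySem.List.sorted_perm needL (fun c => c) false).count_eq c
          have h2 : ∀ c : Char, (PySem.List.sorted haveL (fun c => c) false).count c = haveL.count c :=
            fun c => (PySem.List.sorted_perm haveL (fun c => c) false).count_eq c
          constructor <;> intro hall c <;> have := hall c <;> rw [h1, h2] at * <;> omega
        rw [Bool.eq_iff_iff, hAiff, hBiff]
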